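-- pv_equiv track=rewrite | github.com/gqqnbig/Banzhaf | Banzhaf.py | _findWinningCoalitionsCore
-- ===== SOURCE A (Python) =====
-- def _findWinningCoalitionsCore(quota, weights, consumeIndex: int):
-- 	coalitions = []
--
-- 	while consumeIndex < len(weights):
-- 		head = [consumeIndex]
-- 		if weights[consumeIndex] >= quota:
-- 			coalitions += [head]
--
-- 		tail = _findWinningCoalitionsCore(quota - weights[consumeIndex], weights, consumeIndex + 1)
-- 		coalitions += [head + c for c in tail]
--
-- 		consumeIndex += 1
--
-- 	return coalitions
-- ===== SOURCE B (Python) =====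
-- def _findWinningCoalitionsCore(quota, weights, consumeIndex: int):
-- 	n = len(weights)
-- 	acc = []  # (subset, exact sum) for every nonempty subset of {i..n-1}, lex order
-- 	for i in reversed(range(consumeIndex, n)):
-- 		w = weights[i]
-- 		acc = [([i], w)] + [([i] + s, w + t) for (s, t) in acc] + acc
-- 	return [s for (s, t) in acc if t >= quota]
-- ===== Notes on version B (the rewrite author's own statement) =====
-- stated objective: alternative
-- what changed: Replaces A's quota-threading double recursion (which re-enumerates each suffix once per pending quota remainder) by a single bottom-up pass that builds every suffix subset together with its exact weight sum once, followed by one filter against the quota; lexicographic order falls out of the construction, no sort needed.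
import Mathlib
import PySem

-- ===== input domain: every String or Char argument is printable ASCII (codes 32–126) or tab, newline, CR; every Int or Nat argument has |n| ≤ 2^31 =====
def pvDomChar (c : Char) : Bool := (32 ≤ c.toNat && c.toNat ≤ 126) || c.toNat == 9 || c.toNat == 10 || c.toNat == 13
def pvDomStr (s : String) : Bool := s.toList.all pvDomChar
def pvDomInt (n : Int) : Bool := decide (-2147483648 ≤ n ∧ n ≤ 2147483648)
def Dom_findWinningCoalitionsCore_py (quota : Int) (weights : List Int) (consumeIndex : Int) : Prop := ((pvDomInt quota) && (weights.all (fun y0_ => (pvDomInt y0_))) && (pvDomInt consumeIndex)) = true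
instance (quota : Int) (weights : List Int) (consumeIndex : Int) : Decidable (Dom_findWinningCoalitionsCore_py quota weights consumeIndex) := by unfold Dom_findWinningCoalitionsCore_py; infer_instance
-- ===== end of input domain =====

-- B builds each suffix subset with its exact sum once, bottom-up, then filters by quota;
-- A threads the remaining quota through a double recursion. Same result (alternative decomposition).

-- shared index helper: weights[i] with Python's negative-index rule; Pre_ keeps i in range
def pvGetW (weights : List Int) (i : Int) : Int := (PySem.List.pyGet? weights i).getD 0

-- ===== PORT A =====
def findWinningCoalitionsCore_py (quota : Int) (weights : List Int) (consumeIndex : Int) : List (List Int) :=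
  if h : consumeIndex < (weights.length : Int) then
    ((if pvGetW weights consumeIndex ≥ quota then [[consumeIndex]] else []) ++
      (findWinningCoalitionsCore_py (quota - pvGetW weights consumeIndex) weights (consumeIndex + 1)).map
        (fun c => consumeIndex :: c)) ++
    findWinningCoalitionsCore_py quota weights (consumeIndex + 1)
  else []
termination_by ((weights.length : Int) - consumeIndex).toNat
decreasing_by all_goals omega

-- ===== PORT B =====
-- loop body of Source B: acc = [([i], w)] + [([i] + s, w + t) for (s, t) in acc] + acc
def pvStep (weights : List Int) (acc : List (List Int × Int)) (i : Int) : List (List Int × Int) :=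
  ([i], pvGetW weights i) :: (acc.map (fun p => (i :: p.1, pvGetW weights i + p.2)) ++ acc)

def findWinningCoalitionsCore_py_alt (quota : Int) (weights : List Int) (consumeIndex : Int) : List (List Int) :=
  let n : Int := weights.length
  let acc := ((PySem.List.pyRange consumeIndex n 1).reverse).foldl (pvStep weights) []
  (acc.filter (fun p => quota ≤ p.2)).map (fun p => p.1)

-- ===== PRECONDITION & SPEC =====
-- Pre_ excludes exactly the inputs where A raises IndexError (consumeIndex < -len(weights)).
def Pre_findWinningCoalitionsCore_py (quota : Int) (weights : List Int) (consumeIndex : Int) : Prop :=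
  -(weights.length : Int) ≤ consumeIndex
instance (quota : Int) (weights : List Int) (consumeIndex : Int) : Decidable (Pre_findWinningCoalitionsCore_py quota weights consumeIndex) := by unfold Pre_findWinningCoalitionsCore_py; infer_instance

def pvWitness_findWinningCoalitionsCore_py : Int × List Int × Int := (1, [1], 0)

def Spec_findWinningCoalitionsCore_py (quota : Int) (weights : List Int) (consumeIndex : Int) (out : List (List Int)) : Prop := out = findWinningCoalitionsCore_py_alt quota weights consumeIndex
instance (quota : Int) (weights : List Int) (consumeIndex : Int) (out : List (List Int)) : Decidable (Spec_findWinningCoalitionsCore_py quota weights consumeIndex out) := by unfold Spec_findWinningCoalitionsCore_py; infer_instance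

-- ===== CLAIM (what is proved, stated in full; the proofs are below) =====
def Claim_equal_findWinningCoalitionsCore_py : Prop := ∀ (quota : Int) (weights : List Int) (consumeIndex : Int), Dom_findWinningCoalitionsCore_py quota weights consumeIndex → Pre_findWinningCoalitionsCore_py quota weights consumeIndex → Spec_findWinningCoalitionsCore_py quota weights consumeIndex (findWinningCoalitionsCore_py quota weights consumeIndex)

-- ===== LEMMAS AND PROOFS =====

-- proof-only helper: the value of B's accumulator after processing indices i..n-1 (k = n - i)
def pvSubs (w : List Int) : Int → Nat → List (List Int × Int)
  | _, 0 => []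
  | i, k+1 => pvStep w (pvSubs w (i+1) k) i

theorem pvFoldl_eq_subs (w : List Int) : ∀ (k : Nat) (i : Int), i + k = (w.length : Int) →
    ((PySem.List.pyRange i (w.length : Int) 1).reverse).foldl (pvStep w) [] = pvSubs w i k := by
  intro k
  induction k with
  | zero =>
    intro i hi
    rw [PySem.List.pyRange_one_eq_nil (by omega)]
    rfl
  | succ k ih =>
    intro i hi
    rw [PySem.List.pyRange_one_cons (by omega)]
    simp only [List.reverse_cons, List.foldl_append, List.foldl_cons, List.foldl_nil]
    rw [ih (i+1) (by omega)]
    rfl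

theorem pvA_eq_filter (w : List Int) : ∀ (k : Nat) (q i : Int), i + k = (w.length : Int) →
    findWinningCoalitionsCore_py q w i =
      ((pvSubs w i k).filter (fun p => q ≤ p.2)).map (fun p => p.1) := by
  intro k
  induction k with
  | zero =>
    intro q i hi
    rw [findWinningCoalitionsCore_py, dif_neg (by omega)]
    simp [pvSubs]
  | succ k ih =>
    intro q i hi
    rw [findWinningCoalitionsCore_py, dif_pos (by omega)]
    rw [ih (q - pvGetW w i) (i+1) (by omega), ih q (i+1) (by omega)]
    have hpred : ∀ t : Int, (q ≤ pvGetW w i + t) = (q - pvGetW w i ≤ t) := by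
      intro t; rw [eq_iff_iff]; omega
    by_cases hw : q ≤ pvGetW w i <;>
      simp [pvSubs, pvStep, List.filter_map, Function.comp_def, hpred, hw, ge_iff_le,
        List.map_map]

-- ===== VERDICT (by name: the statement is the Claim_ definition above) =====
theorem findWinningCoalitionsCore_py_spec : Claim_equal_findWinningCoalitionsCore_py := by
  intro quota weights consumeIndex _hd _hp
  unfold Spec_findWinningCoalitionsCore_py
  simp only [findWinningCoalitionsCore_py_alt]
  by_cases h : consumeIndex < (weights.length : Int)
  · have hk : consumeIndex + ((weights.length : Int) - consumeIndex).toNat = (weights.length : Int) := by omega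
    rw [pvA_eq_filter weights _ quota consumeIndex hk,
        pvFoldl_eq_subs weights _ consumeIndex hk]
  · rw [findWinningCoalitionsCore_py]
    rw [dif_neg h, PySem.List.pyRange_one_eq_nil (by omega)]
    rfl
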